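-- pv_equiv track=rewrite | github.com/Crazzzyest/Ortopartner | src/dashboard.py | _render_order_warnings_block
-- ===== SOURCE A (Python) =====
-- def _classify_warning(msg: str) -> str:
--     """Return a CSS class / severity tag for a warning message."""
--     lower = msg.lower()
--     if "enhetspris utledet" in lower:
--         return "info"
--     if "enhetspris hentet fra produktkatalog" in lower:
--         return "info"
--     if "enhetspris-avvik" in lower or "rabatt-avvik" in lower:
--         return "warn"
--     if "kontraktsrabatt" in lower or "fylte inn" in lower:
--         return "warn"
--     if "ny kunde opprettet" in lower:
--         return "warn"
--     if "finnes ikke i odoo" in lower: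
--         return "warn"
--     if "mangler" in lower:
--         return "warn"
--     return "info"
--
-- def _render_order_warnings_block(warnings: list[str]) -> str:
--     """Render warnings as a grouped, color-coded list (like Odoo message log)."""
--     if not warnings:
--         return '<div class="no-warnings">Ingen advarsler</div>'
--
--     info = [w for w in warnings if _classify_warning(w) == "info"]
--     warn = [w for w in warnings if _classify_warning(w) == "warn"]
--
--     parts = []
--     if warn:
--         parts.append('<div class="warning-group warn">')
--         parts.append('<div class="warning-group-title">Krever oppmerksomhet</div>')
--         parts.append('<ul>')
--         for w in warn:
--             parts.append(f'<li>{_escape(w)}</li>')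
--         parts.append('</ul>')
--         parts.append('</div>')
--     if info:
--         parts.append('<div class="warning-group info">')
--         parts.append('<div class="warning-group-title">Informasjon</div>')
--         parts.append('<ul>')
--         for w in info:
--             parts.append(f'<li>{_escape(w)}</li>')
--         parts.append('</ul>')
--         parts.append('</div>')
--     return "".join(parts)
--
-- def _escape(s: str) -> str:
--     """Minimal HTML escape."""
--     if s is None:
--         return ""
--     return (str(s)
--             .replace("&", "&amp;")
--             .replace("<", "&lt;")
--             .replace(">", "&gt;")
--             .replace('"', "&quot;"))
-- ===== SOURCE B (Python) =====
-- def _classify_warning(msg: str) -> str: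
--     """Return a CSS class / severity tag for a warning message."""
--     lower = msg.lower()
--     if "enhetspris utledet" in lower:
--         return "info"
--     if "enhetspris hentet fra produktkatalog" in lower:
--         return "info"
--     if "enhetspris-avvik" in lower or "rabatt-avvik" in lower:
--         return "warn"
--     if "kontraktsrabatt" in lower or "fylte inn" in lower:
--         return "warn"
--     if "ny kunde opprettet" in lower:
--         return "warn"
--     if "finnes ikke i odoo" in lower:
--         return "warn"
--     if "mangler" in lower:
--         return "warn"
--     return "info"
--
--
-- def _escape(s: str) -> str:
--     """Minimal HTML escape."""
--     if s is None:
--         return ""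
--     return (str(s)
--             .replace("&", "&amp;")
--             .replace("<", "&lt;")
--             .replace(">", "&gt;")
--             .replace('"', "&quot;"))
--
--
-- def _render_order_warnings_block(warnings: list[str]) -> str:
--     """Single classification pass into severity groups, then table-driven emission."""
--     if not warnings:
--         return '<div class="no-warnings">Ingen advarsler</div>'
--
--     groups = {}
--     for w in warnings:
--         groups.setdefault(_classify_warning(w), []).append(w)
--
--     parts = []
--     for key, title in (("warn", "Krever oppmerksomhet"), ("info", "Informasjon")):
--         group = groups.get(key, [])
--         if group:
--             parts.append(f'<div class="warning-group {key}">')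
--             parts.append(f'<div class="warning-group-title">{title}</div>')
--             parts.append('<ul>')
--             parts.extend(f'<li>{_escape(w)}</li>' for w in group)
--             parts.append('</ul>')
--             parts.append('</div>')
--     return "".join(parts)
-- ===== Notes on version B (the rewrite author's own statement) =====
-- stated objective: simpler
-- what changed: Replaced two full classification passes plus two duplicated hardcoded emission if-blocks with one grouping pass into a dict of lists and a single table-driven emission loop over (key, title) specs.
import Mathlib
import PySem

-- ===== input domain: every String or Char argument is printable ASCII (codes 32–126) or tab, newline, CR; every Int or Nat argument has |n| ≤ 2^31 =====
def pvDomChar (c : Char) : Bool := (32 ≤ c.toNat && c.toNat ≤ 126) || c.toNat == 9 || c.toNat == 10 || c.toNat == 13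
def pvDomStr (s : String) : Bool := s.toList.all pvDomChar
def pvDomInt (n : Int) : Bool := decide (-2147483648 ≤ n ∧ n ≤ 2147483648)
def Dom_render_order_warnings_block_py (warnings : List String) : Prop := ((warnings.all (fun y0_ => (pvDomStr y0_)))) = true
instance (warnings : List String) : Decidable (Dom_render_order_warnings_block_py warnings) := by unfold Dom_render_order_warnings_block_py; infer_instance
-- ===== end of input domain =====

-- B replaces A's two classification passes and duplicated emission blocks with one grouping
-- pass plus a table-driven emission loop (objective: simpler). Return values only; no mutation.

-- ===== PORT A =====
-- shared helper of both Pythons: _classify_warning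
def pyClassifyWarning (msg : String) : String :=
  let lower := PySem.Str.lower msg
  if PySem.Str.isIn "enhetspris utledet" lower then "info"
  else if PySem.Str.isIn "enhetspris hentet fra produktkatalog" lower then "info"
  else if PySem.Str.isIn "enhetspris-avvik" lower || PySem.Str.isIn "rabatt-avvik" lower then "warn"
  else if PySem.Str.isIn "kontraktsrabatt" lower || PySem.Str.isIn "fylte inn" lower then "warn"
  else if PySem.Str.isIn "ny kunde opprettet" lower then "warn"
  else if PySem.Str.isIn "finnes ikke i odoo" lower then "warn"
  else if PySem.Str.isIn "mangler" lower then "warn"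
  else "info"

-- shared helper of both Pythons: _escape ('s is None' is unreachable for a String argument; str(s) is the identity)
def pyEscape (s : String) : String :=
  PySem.Str.replace (PySem.Str.replace (PySem.Str.replace (PySem.Str.replace s "&" "&amp;") "<" "&lt;") ">" "&gt;") "\"" "&quot;"

def render_order_warnings_block_py (warnings : List String) : String :=
  if warnings = [] then "<div class=\"no-warnings\">Ingen advarsler</div>"
  else
    let info := warnings.filter (fun w => pyClassifyWarning w == "info")
    let warn := warnings.filter (fun w => pyClassifyWarning w == "warn")
    let parts : List String := []
    let parts := if warn ≠ [] then
        parts ++ ["<div class=\"warning-group warn\">", "<div class=\"warning-group-title\">Krever oppmerksomhet</div>", "<ul>"]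
          ++ warn.foldl (fun acc w => acc ++ ["<li>" ++ pyEscape w ++ "</li>"]) []
          ++ ["</ul>", "</div>"]
      else parts
    let parts := if info ≠ [] then
        parts ++ ["<div class=\"warning-group info\">", "<div class=\"warning-group-title\">Informasjon</div>", "<ul>"]
          ++ info.foldl (fun acc w => acc ++ ["<li>" ++ pyEscape w ++ "</li>"]) []
          ++ ["</ul>", "</div>"]
      else parts
    PySem.Str.join "" parts

-- ===== PORT B =====
def render_order_warnings_block_py_alt (warnings : List String) : String :=
  if warnings = [] then "<div class=\"no-warnings\">Ingen advarsler</div>"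
  else
    let groups : PySem.Dict String (List String) :=
      warnings.foldl (fun d w => d.modify (pyClassifyWarning w) [] (fun l => l ++ [w])) PySem.Dict.empty
    let parts := [("warn", "Krever oppmerksomhet"), ("info", "Informasjon")].foldl
      (fun (parts : List String) (kt : String × String) =>
        let group := groups.getD kt.1 []
        if group ≠ [] then
          parts ++ ["<div class=\"warning-group " ++ kt.1 ++ "\">",
                    "<div class=\"warning-group-title\">" ++ kt.2 ++ "</div>", "<ul>"]
            ++ group.map (fun w => "<li>" ++ pyEscape w ++ "</li>")
            ++ ["</ul>", "</div>"]
        else parts) []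
    PySem.Str.join "" parts

-- ===== PRECONDITION & SPEC =====
def Spec_render_order_warnings_block_py (warnings : List String) (out : String) : Prop := out = render_order_warnings_block_py_alt warnings
instance (warnings : List String) (out : String) : Decidable (Spec_render_order_warnings_block_py warnings out) := by unfold Spec_render_order_warnings_block_py; infer_instance

-- ===== CLAIM (what is proved, stated in full; the proofs are below) =====
def Claim_equal_render_order_warnings_block_py : Prop := ∀ (warnings : List String), Dom_render_order_warnings_block_py warnings → Spec_render_order_warnings_block_py warnings (render_order_warnings_block_py warnings)

-- ===== LEMMAS AND PROOFS =====

-- B's grouping pass looked up at key c is A's filter by severity c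
theorem groups_getD (warnings : List String) (c : String) :
    (warnings.foldl (fun d w => d.modify (pyClassifyWarning w) [] (fun l => l ++ [w]))
        (PySem.Dict.empty : PySem.Dict String (List String))).getD c []
      = warnings.filter (fun w => pyClassifyWarning w == c) := by
  have h : warnings.foldl (fun d w => d.modify (pyClassifyWarning w) [] (fun l => l ++ [w]))
        (PySem.Dict.empty : PySem.Dict String (List String))
      = (warnings.map (fun w => (pyClassifyWarning w, w))).foldl
          (fun d p => d.modify p.1 [] (fun l => l ++ [p.2])) PySem.Dict.empty := by
    rw [List.foldl_map]
  rw [h, PySem.Dict.getD_foldl_modify_append]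
  simp [List.filter_map, Function.comp_def]

-- ===== VERDICT (by name: the statement is the Claim_ definition above) =====
theorem render_order_warnings_block_py_spec : Claim_equal_render_order_warnings_block_py := by
  intro warnings _
  unfold Spec_render_order_warnings_block_py render_order_warnings_block_py render_order_warnings_block_py_alt
  by_cases h : warnings = []
  · simp [h]
  · simp only [h, if_false, List.foldl]
    rw [groups_getD, groups_getD,
      PySem.List.foldl_append_singleton_eq_map, PySem.List.foldl_append_singleton_eq_map]
    rfl
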